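-- pv_equiv track=rewrite | github.com/divyatejakotteti/100DaysOfCode | Day 22/PickingNumbers.py | pickingNumbers
-- ===== SOURCE A (Python) =====
-- def pickingNumbers(a):
--     # Write your code here
--     maximum = 0
--     diff = 1
--     for i in a:
--         n = a.count(i)
--         m = a.count(i-diff)
--         s=n+m
--         maximum = max(maximum,s)
--     return (maximum)
-- ===== SOURCE B (Python) =====
-- def pickingNumbers(a):
--     # Sort, then a single linear scan over runs of equal values: keep the length
--     # of the current run and of the immediately preceding run; whenever the two
--     # run values differ by exactly 1 their lengths combine.
--     best = 0
--     prev_v = None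
--     prev_c = 0
--     cur_v = None
--     cur_c = 0
--     for x in sorted(a):
--         if x == cur_v:
--             cur_c += 1
--         else:
--             prev_v, prev_c = cur_v, cur_c
--             cur_v, cur_c = x, 1
--         total = cur_c + (prev_c if prev_v == cur_v - 1 else 0)
--         if total > best:
--             best = total
--     return best
-- ===== Notes on version B (the rewrite author's own statement) =====
-- stated objective: faster
-- what changed: Replaces A's per-element pair of full list.count scans with sort followed by one linear scan over runs of equal values, combining the current run length with the previous run length when the two run values differ by 1.
import Mathlib
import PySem

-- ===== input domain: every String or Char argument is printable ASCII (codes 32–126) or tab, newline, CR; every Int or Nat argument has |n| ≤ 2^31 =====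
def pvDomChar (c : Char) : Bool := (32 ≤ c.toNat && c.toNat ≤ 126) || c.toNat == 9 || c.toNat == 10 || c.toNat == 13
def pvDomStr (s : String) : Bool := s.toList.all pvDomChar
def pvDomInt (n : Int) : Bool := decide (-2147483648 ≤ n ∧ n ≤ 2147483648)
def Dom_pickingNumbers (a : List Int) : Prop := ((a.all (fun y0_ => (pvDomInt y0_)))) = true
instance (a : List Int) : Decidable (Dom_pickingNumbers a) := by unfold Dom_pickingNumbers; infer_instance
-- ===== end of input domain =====

-- B sorts and does one linear scan over runs of equal values instead of A's two full
-- count-scans per element; a timing run measured B faster at the largest size.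

-- ===== PORT A =====
-- A: for each element i, maximum = max(maximum, a.count(i) + a.count(i-1))
def pickingNumbers (a : List Int) : Int :=
  a.foldl (fun maximum i =>
    max maximum ((PySem.List.count a i : Int) + (PySem.List.count a (i - 1) : Int))) 0

-- ===== PORT B =====
-- the for-loop of Source B: state (best, prev_v, prev_c, cur_v, cur_c), one step per element
def pickingLoop (best : Int) (pv : Option Int) (pc : Int) (cv : Option Int) (cc : Int) :
    List Int → Int
  | [] => best
  | x :: r =>
    if some x = cv then
      let cc' := cc + 1
      let total := cc' + (if pv = some (x - 1) then pc else 0)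
      pickingLoop (max best total) pv pc cv cc' r
    else
      let pv' := cv
      let pc' := cc
      let total := 1 + (if pv' = some (x - 1) then pc' else 0)
      pickingLoop (max best total) pv' pc' (some x) 1 r

def pickingNumbers_alt (a : List Int) : Int :=
  pickingLoop 0 none 0 none 0 (PySem.List.sorted a (fun x => x) false)

-- ===== PRECONDITION & SPEC =====
def Spec_pickingNumbers (a : List Int) (out : Int) : Prop := out = pickingNumbers_alt a
instance (a : List Int) (out : Int) : Decidable (Spec_pickingNumbers a out) := by unfold Spec_pickingNumbers; infer_instance

-- ===== CLAIM (what is proved, stated in full; the proofs are below) =====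
def Claim_equal_pickingNumbers : Prop := ∀ (a : List Int), Dom_pickingNumbers a → Spec_pickingNumbers a (pickingNumbers a)

-- ===== LEMMAS AND PROOFS =====

-- count as an Int (proof-side abbreviation)
def pvCnt (l : List Int) (x : Int) : Int := (l.count x : Int)

theorem pvCnt_nonneg (l : List Int) (x : Int) : 0 ≤ pvCnt l x := by
  simp [pvCnt]

theorem pvCnt_cons (y x : Int) (l : List Int) :
    pvCnt (y :: l) x = pvCnt l x + (if y = x then 1 else 0) := by
  by_cases h : y = x <;> simp [pvCnt, h]

theorem pvCnt_eq_zero (l : List Int) (x : Int) (h : x ∉ l) : pvCnt l x = 0 := by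
  simp [pvCnt, List.count_eq_zero.mpr h]

-- upper bound for A's running max
theorem pv_foldl_max_le (f : Int → Int) (l : List Int) (C : Int)
    (hl : ∀ x ∈ l, f x ≤ C) : ∀ b, b ≤ C →
    l.foldl (fun m i => max m (f i)) b ≤ C := by
  induction l with
  | nil => intro b hb; simpa using hb
  | cons y t ih =>
    intro b hb
    exact ih (fun x hx => hl x (List.mem_cons_of_mem _ hx)) _
      (max_le hb (hl y List.mem_cons_self))

-- B's loop result is at least the incoming best
theorem pickingLoop_ge_best : ∀ (r : List Int) (best pc cc : Int) (pv cv : Option Int),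
    best ≤ pickingLoop best pv pc cv cc r := by
  intro r
  induction r with
  | nil => intro best pc cc pv cv; simp [pickingLoop]
  | cons x t ih =>
    intro best pc cc pv cv
    by_cases h : some x = cv <;>
      simp only [pickingLoop, h, if_pos, if_neg, not_false_iff] <;>
      exact le_trans (le_max_left _ _) (ih _ _ _ _ _)

-- upper bound: every state component is dominated by the counts of a, so the loop
-- never exceeds a bound C dominating best and all values cnt a x + cnt a (x-1), x ∈ r
theorem pickingLoop_le (a : List Int) (C : Int) :
    ∀ (r : List Int) (best pc cc : Int) (pv cv : Option Int),
    best ≤ C →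
    (∀ x ∈ r, pvCnt a x + pvCnt a (x - 1) ≤ C) →
    (∀ y, pvCnt r y ≤ pvCnt a y) →
    (∀ v, cv = some v → cc + pvCnt r v ≤ pvCnt a v) →
    (∀ u, pv = some u → pc ≤ pvCnt a u) →
    pickingLoop best pv pc cv cc r ≤ C := by
  intro r
  induction r with
  | nil => intro best pc cc pv cv hb _ _ _ _; simpa [pickingLoop] using hb
  | cons x t ih =>
    intro best pc cc pv cv hb hf hsub hcv hpv
    have hsub' : ∀ y, pvCnt t y ≤ pvCnt a y := by
      intro y
      have := hsub y
      rw [pvCnt_cons] at this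
      have : pvCnt t y ≤ pvCnt a y - (if x = y then 1 else 0) := by omega
      have h0 : (0:Int) ≤ (if x = y then 1 else 0) := by positivity
      omega
    have hfx := hf x List.mem_cons_self
    have hft : ∀ y ∈ t, pvCnt a y + pvCnt a (y - 1) ≤ C :=
      fun y hy => hf y (List.mem_cons_of_mem _ hy)
    by_cases h : some x = cv
    · -- x continues the current run
      have hccx : cc + 1 + pvCnt t x ≤ pvCnt a x := by
        have := hcv x h.symm
        rw [pvCnt_cons] at this
        simp at this
        omega
      have htle : cc + 1 + (if pv = some (x - 1) then pc else 0) ≤ C := by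
        have h1 : cc + 1 ≤ pvCnt a x := by
          have := pvCnt_nonneg t x; omega
        have h2 : (if pv = some (x - 1) then pc else 0) ≤ pvCnt a (x - 1) := by
          split_ifs with hp
          · exact hpv _ hp
          · exact pvCnt_nonneg a (x - 1)
        omega
      simp only [pickingLoop, h, if_pos]
      exact ih _ _ _ _ _ (max_le hb htle) hft hsub'
        (fun v hv => by
          have e : x = v := Option.some.inj (h.trans hv)
          subst e
          have := hcv x h.symm
          rw [pvCnt_cons] at this
          simp at this
          omega)
        hpv
    · -- x starts a new run
      have hcx : 1 + pvCnt t x ≤ pvCnt a x := by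
        have := hsub x
        rw [pvCnt_cons] at this
        simp at this
        omega
      have htle : 1 + (if cv = some (x - 1) then cc else 0) ≤ C := by
        have h1 : (1:Int) ≤ pvCnt a x := by
          have := pvCnt_nonneg t x; omega
        have h2 : (if cv = some (x - 1) then cc else 0) ≤ pvCnt a (x - 1) := by
          split_ifs with hp
          · have := hcv _ hp
            have := pvCnt_nonneg (x :: t) (x - 1)
            omega
          · exact pvCnt_nonneg a (x - 1)
        omega
      simp only [pickingLoop, h, if_neg, not_false_iff]
      exact ih _ _ _ _ _ (max_le hb htle) hft hsub'
        (fun v hv => by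
          have e : x = v := Option.some.inj hv
          subst e
          omega)
        (fun u hu => by
          have := hcv _ hu
          have := pvCnt_nonneg (x :: t) u
          omega)

-- lower bound: over a sorted suffix r whose state summarises the processed prefix
-- exactly (pvCnt a w - pvCnt r w is the prefix count of w), the loop reaches
-- cnt a x + cnt a (x-1) for every x ∈ r
theorem pickingLoop_ge (a : List Int) :
    ∀ (r : List Int) (best pc cc : Int) (pv cv : Option Int),
    r.Pairwise (· ≤ ·) →
    (∀ v, cv = some v → ∀ y ∈ r, v ≤ y) →
    (∀ v, cv = some v →
      pvCnt a v - pvCnt r v = cc ∧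
      (∀ w, v < w → pvCnt a w = pvCnt r w) ∧
      pvCnt a (v - 1) - pvCnt r (v - 1) = (if pv = some (v - 1) then pc else 0)) →
    (cv = none → ∀ w, pvCnt a w = pvCnt r w) →
    ∀ x ∈ r, pvCnt a x + pvCnt a (x - 1) ≤ pickingLoop best pv pc cv cc r := by
  intro r
  induction r with
  | nil => intro _ _ _ _ _ _ _ _ _ x hx; simp at hx
  | cons x t ih =>
    intro best pc cc pv cv hsort hgt hcv hnone z hz
    have hsort' : t.Pairwise (· ≤ ·) := hsort.of_cons
    have hxle : ∀ y ∈ t, x ≤ y := fun y hy => (List.pairwise_cons.mp hsort).1 y hy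
    have hcnt_xm1_t : pvCnt t (x - 1) = 0 :=
      pvCnt_eq_zero _ _ (fun hmem => by have := hxle _ hmem; omega)
    by_cases h : some x = cv
    · -- continue the run: cv = some x
      have hx_cv := hcv x h.symm
      obtain ⟨h1, h2, h3⟩ := hx_cv
      have hcx : pvCnt a x = cc + 1 + pvCnt t x := by
        rw [pvCnt_cons] at h1; simp at h1; omega
      -- the remaining elements are still ≥ x
      have hgt' : ∀ v, cv = some v → ∀ y ∈ t, v ≤ y := by
        intro v hv y hy
        have e : x = v := Option.some.inj (h.trans hv)
        subst e
        exact hxle y hy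
      have hcv' : ∀ v, cv = some v →
          pvCnt a v - pvCnt t v = cc + 1 ∧
          (∀ w, v < w → pvCnt a w = pvCnt t w) ∧
          pvCnt a (v - 1) - pvCnt t (v - 1) = (if pv = some (v - 1) then pc else 0) := by
        intro v hv
        have e : x = v := Option.some.inj (h.trans hv)
        subst e
        refine ⟨by omega, fun w hw => ?_, ?_⟩
        · have := h2 w hw
          rw [pvCnt_cons] at this
          have hne : ¬ (x = w) := by omega
          simp [hne] at this
          omega
        · rw [pvCnt_cons] at h3
          have hne : ¬ (x = x - 1) := by omega
          simp [hne] at h3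
          omega
      have hloop := ih (max best (cc + 1 + (if pv = some (x - 1) then pc else 0)))
        pc (cc + 1) pv cv hsort' hgt' hcv' (fun hn => by rw [hn] at h; cases h)
      simp only [pickingLoop, h, if_pos]
      rcases List.mem_cons.mp hz with hzx | hzt
      · -- goal element is the head x: either x recurs in t (use IH) or total hits it now
        rw [hzx]
        by_cases hxt : x ∈ t
        · exact hloop x hxt
        · have hcx0 : pvCnt t x = 0 := pvCnt_eq_zero _ _ hxt
          have hxm1 : pvCnt a (x - 1) = (if pv = some (x - 1) then pc else 0) := by
            rw [pvCnt_cons] at h3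
            have hne : ¬ (x = x - 1) := by omega
            simp [hne] at h3
            omega
          have : pvCnt a x + pvCnt a (x - 1)
              ≤ max best (cc + 1 + (if pv = some (x - 1) then pc else 0)) := by
            have := le_max_right best (cc + 1 + (if pv = some (x - 1) then pc else 0))
            omega
          exact le_trans this (pickingLoop_ge_best _ _ _ _ _ _)
      · exact hloop z hzt
    · -- new run: cur becomes x, prev becomes the old cur
      have hprev : pvCnt a x = 1 + pvCnt t x ∧
          (∀ w, x < w → pvCnt a w = pvCnt t w) ∧
          pvCnt a (x - 1) = (if cv = some (x - 1) then cc else 0) := by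
        rcases hcveq : cv with _ | v
        · have hn := hnone hcveq
          refine ⟨by have := hn x; rw [pvCnt_cons] at this; simp at this; omega,
            fun w hw => by
              have := hn w; rw [pvCnt_cons] at this
              have hne : ¬ (x = w) := by omega
              simp [hne] at this; omega, ?_⟩
          have := hn (x - 1)
          rw [pvCnt_cons] at this
          have hne : ¬ (x = x - 1) := by omega
          simp [hne] at this
          simp [this, hcnt_xm1_t]
        · obtain ⟨h1, h2, h3⟩ := hcv v hcveq
          have hvx : v ≤ x := hgt v hcveq x List.mem_cons_self
          have hvlt : v < x := by
            rcases lt_or_eq_of_le hvx with hlt | heq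
            · exact hlt
            · exact absurd ((congrArg Option.some heq).symm.trans hcveq.symm) h
          refine ⟨?_, fun w hw => ?_, ?_⟩
          · have := h2 x hvlt
            rw [pvCnt_cons] at this
            simp at this
            omega
          · have := h2 w (lt_trans hvlt hw)
            rw [pvCnt_cons] at this
            have hne : ¬ (x = w) := by omega
            simp [hne] at this
            omega
          · by_cases hveq : v = x - 1
            · subst hveq
              rw [pvCnt_cons] at h1
              have hne : ¬ (x = x - 1) := by omega
              simp [hne] at h1
              have hnot : (x - 1) ∉ t := fun hm => by have := hxle _ hm; omega
              have h0 := pvCnt_eq_zero t (x - 1) hnot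
              simp
              omega
            · have hgtv : v < x - 1 ∨ v = x - 1 ∨ x - 1 < v := by omega
              have : pvCnt a (x - 1) = pvCnt (x :: t) (x - 1) := by
                rcases hgtv with hlt | heq | hgt2
                · exact h2 (x - 1) (by omega)
                · exact absurd heq hveq
                · omega
              rw [pvCnt_cons] at this
              have hne : ¬ (x = x - 1) := by omega
              simp [hne, hcnt_xm1_t] at this
              simp [hveq]
              omega
      obtain ⟨g1, g2, g3⟩ := hprev
      have hgt' : ∀ v, (some x : Option Int) = some v → ∀ y ∈ t, v ≤ y := by
        intro v hv y hy
        have e : x = v := Option.some.inj hv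
        subst e
        exact hxle y hy
      have hcv' : ∀ v, (some x : Option Int) = some v →
          pvCnt a v - pvCnt t v = 1 ∧
          (∀ w, v < w → pvCnt a w = pvCnt t w) ∧
          pvCnt a (v - 1) - pvCnt t (v - 1) = (if cv = some (v - 1) then cc else 0) := by
        intro v hv
        have e : x = v := Option.some.inj hv
        subst e
        exact ⟨by omega, g2, by rw [hcnt_xm1_t]; omega⟩
      have hloop := ih (max best (1 + (if cv = some (x - 1) then cc else 0)))
        cc 1 cv (some x) hsort' hgt' hcv' (by intro hh; cases hh)
      simp only [pickingLoop, h, if_neg, not_false_iff]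
      rcases List.mem_cons.mp hz with hzx | hzt
      · rw [hzx]
        by_cases hxt : x ∈ t
        · exact hloop x hxt
        · have hcx0 : pvCnt t x = 0 := pvCnt_eq_zero _ _ hxt
          have : pvCnt a x + pvCnt a (x - 1)
              ≤ max best (1 + (if cv = some (x - 1) then cc else 0)) := by
            have := le_max_right best (1 + (if cv = some (x - 1) then cc else 0))
            omega
          exact le_trans this (pickingLoop_ge_best _ _ _ _ _ _)
      · exact hloop z hzt

-- ===== VERDICT (by name: the statement is the Claim_ definition above) =====
theorem pickingNumbers_spec : Claim_equal_pickingNumbers := by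
  intro a _
  unfold Spec_pickingNumbers pickingNumbers pickingNumbers_alt
  set s := PySem.List.sorted a (fun x => x) false with hs
  have hperm : s.Perm a := PySem.List.sorted_perm a (fun x => x) false
  have hcnt : ∀ y, pvCnt s y = pvCnt a y := by
    intro y; simp [pvCnt, hperm.count_eq]
  have hmem : ∀ y, y ∈ s ↔ y ∈ a := fun y => hperm.mem_iff
  have hsorted : s.Pairwise (· ≤ ·) := PySem.List.sorted_pairwise a (fun x => x)
  -- A's fold, written with pvCnt
  have hA : (a.foldl (fun maximum i =>
      max maximum ((PySem.List.count a i : Int) + (PySem.List.count a (i - 1) : Int))) 0)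
      = a.foldl (fun m i => max m (pvCnt a i + pvCnt a (i - 1))) 0 := by
    simp [pvCnt, PySem.List.count_eq]
  rw [hA]
  have hbounds := PySem.List.le_foldl_max_int a (fun i => pvCnt a i + pvCnt a (i - 1)) 0
  set A := a.foldl (fun m i => max m (pvCnt a i + pvCnt a (i - 1))) 0 with hAdef
  set B := pickingLoop 0 none 0 none 0 s with hBdef
  have hBleA : B ≤ A := by
    refine pickingLoop_le a A s 0 0 0 none none hbounds.1 ?_ ?_ ?_ ?_
    · intro x hx
      exact hbounds.2 x ((hmem x).mp hx)
    · intro y; exact le_of_eq (hcnt y)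
    · intro v hv; cases hv
    · intro u hu; cases hu
  have hAleB : A ≤ B := by
    have h0 : (0:Int) ≤ B := pickingLoop_ge_best s 0 0 0 none none
    refine pv_foldl_max_le _ a B ?_ 0 h0
    intro x hx
    exact pickingLoop_ge a s 0 0 0 none none hsorted
      (fun v hv => by cases hv) (fun v hv => by cases hv)
      (fun _ w => (hcnt w).symm) x ((hmem x).mpr hx)
  omega
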